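-- pv_equiv track=rewrite | github.com/mrunesson/stockrec | stockrec/extract.py | merge_terms_in_tokens
-- ===== SOURCE A (Python) =====
-- from typing import List
--
-- _terms = ['market perform', 'sector perform', 'norska kronor', 'danska kronor', 'brittiska pund']
--
-- _terms_start = [term.split( )[0] for term in _terms]
--
-- def merge_terms_in_tokens(tokens: List) -> List:
--     result=[]
--     holder=None
--     for t in tokens:
--         if holder is None:
--             if t in _terms_start:
--                 holder = t
--             else:
--                 result.append(t)
--         else:
--             if holder + ' ' + t in _terms:
--                 result.append(holder + ' ' + t)
--             else:
--                 result.append(holder)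
--                 result.append(t)
--             holder = None
--     return result
-- ===== SOURCE B (Python) =====
-- from typing import List
--
-- _terms = ['market perform', 'sector perform', 'norska kronor', 'danska kronor', 'brittiska pund']
--
-- _terms_start = [term.split( )[0] for term in _terms]
--
-- def merge_terms_in_tokens(tokens: List) -> List:
--     result = []
--     i = 0
--     n = len(tokens)
--     while i < n:
--         t = tokens[i]
--         if t in _terms_start and i + 1 < n:
--             merged = t + ' ' + tokens[i + 1]
--             if merged in _terms:
--                 result.append(merged)
--             else:
--                 result.append(t)
--                 result.append(tokens[i + 1])
--             i += 2
--         else: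
--             result.append(t)
--             i += 1
--     return result
-- ===== Notes on version B (the rewrite author's own statement) =====
-- stated objective: alternative
-- what changed: Replaces A's fold carrying a pending-`holder` state by an index/pairing loop that, at a start word with a successor, consumes two tokens at once; same O(n) cost.
-- intended difference: When the input ends in an odd-length run of two-word-term start words, A's pending holder is never flushed and the last token is silently dropped (e.g. ['norska'] -> []), while B keeps it (['norska']); keeping every token is the intended behaviour for a tokenizer helper. — e.g. on merge_terms_in_tokens(["norska"]): A returns [], B returns ["norska"]
import Mathlib
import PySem

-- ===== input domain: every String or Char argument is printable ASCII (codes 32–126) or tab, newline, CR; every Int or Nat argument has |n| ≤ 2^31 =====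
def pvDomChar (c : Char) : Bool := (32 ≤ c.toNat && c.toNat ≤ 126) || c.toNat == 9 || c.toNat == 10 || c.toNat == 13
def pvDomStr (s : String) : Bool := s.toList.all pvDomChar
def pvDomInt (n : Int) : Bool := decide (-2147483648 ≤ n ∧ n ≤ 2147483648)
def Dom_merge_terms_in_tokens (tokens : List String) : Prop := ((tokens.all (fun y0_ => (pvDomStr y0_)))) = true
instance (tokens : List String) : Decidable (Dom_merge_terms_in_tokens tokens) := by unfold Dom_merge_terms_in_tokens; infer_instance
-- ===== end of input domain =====

-- B replaces A's carried `holder` state by an index loop that pairs a start word with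
-- its successor in one step (objective: alternative decomposition, same cost); B also
-- keeps a trailing unpaired start word that A silently drops (see D_ below).

def pvTerms : List String :=
  ["market perform", "sector perform", "norska kronor", "danska kronor", "brittiska pund"]

def pvTermsStart : List String := ["market", "sector", "norska", "danska", "brittiska"]

-- ===== PORT A =====
-- A: fold over the tokens carrying (result, holder); holder buffers a pending start word.
def pvAStep (st : List String × Option String) (t : String) : List String × Option String :=
  match st.2 with
  | none => if t ∈ pvTermsStart then (st.1, some t) else (st.1 ++ [t], none)
  | some h =>
    if (h ++ " " ++ t) ∈ pvTerms then (st.1 ++ [h ++ " " ++ t], none)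
    else (st.1 ++ [h, t], none)

def merge_terms_in_tokens (tokens : List String) : List String :=
  (tokens.foldl pvAStep ([], none)).1

-- ===== PORT B =====
-- B: index/pairing loop — consume two tokens at a start word, one otherwise.
def pvBGo : List String → List String
  | [] => []
  | [t] => [t]
  | t :: u :: rest =>
    if t ∈ pvTermsStart then
      if (t ++ " " ++ u) ∈ pvTerms then (t ++ " " ++ u) :: pvBGo rest
      else t :: u :: pvBGo rest
    else t :: pvBGo (u :: rest)

def merge_terms_in_tokens_alt (tokens : List String) : List String := pvBGo tokens

-- ===== PRECONDITION & SPEC =====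
-- When the input ends in an odd-length run of start words, A's final `holder` is never
-- flushed and the last token is silently dropped; B keeps it, which is the intended
-- behaviour for a tokenizer helper (no token should vanish).
def D_merge_terms_in_tokens (tokens : List String) : Prop :=
  ((tokens.reverse.takeWhile (fun t => t ∈ pvTermsStart)).length) % 2 = 1

instance (tokens : List String) : Decidable (D_merge_terms_in_tokens tokens) := by
  unfold D_merge_terms_in_tokens; infer_instance

def Spec_merge_terms_in_tokens (tokens : List String) (out : List String) : Prop :=
  ¬ D_merge_terms_in_tokens tokens → out = merge_terms_in_tokens_alt tokens
instance (tokens : List String) (out : List String) : Decidable (Spec_merge_terms_in_tokens tokens out) := by unfold Spec_merge_terms_in_tokens; infer_instance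

def pvDiffWitness_merge_terms_in_tokens : List String := ["norska"]
def pvDiffWitnessOut_merge_terms_in_tokens : (List String) × (List String) := ([], ["norska"])

-- ===== CLAIM (what is proved, stated in full; the proofs are below) =====
def Claim_unchanged_merge_terms_in_tokens : Prop := ∀ (tokens : List String), Dom_merge_terms_in_tokens tokens → Spec_merge_terms_in_tokens tokens (merge_terms_in_tokens tokens)
def Claim_changed_merge_terms_in_tokens : Prop := Dom_merge_terms_in_tokens (pvDiffWitness_merge_terms_in_tokens) ∧ D_merge_terms_in_tokens (pvDiffWitness_merge_terms_in_tokens) ∧ merge_terms_in_tokens (pvDiffWitness_merge_terms_in_tokens) = pvDiffWitnessOut_merge_terms_in_tokens.1 ∧ merge_terms_in_tokens_alt (pvDiffWitness_merge_terms_in_tokens) = pvDiffWitnessOut_merge_terms_in_tokens.2 ∧ pvDiffWitnessOut_merge_terms_in_tokens.1 ≠ pvDiffWitnessOut_merge_terms_in_tokens.2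
def Claim_exact_merge_terms_in_tokens : Prop := ∀ (tokens : List String), Dom_merge_terms_in_tokens tokens → D_merge_terms_in_tokens tokens → merge_terms_in_tokens tokens ≠ merge_terms_in_tokens_alt tokens

-- ===== LEMMAS AND PROOFS =====

-- goA: recursive characterisation of A's fold (drops a trailing unpaired start word).
def goA : List String → List String
  | [] => []
  | [t] => if t ∈ pvTermsStart then [] else [t]
  | t :: u :: rest =>
    if t ∈ pvTermsStart then
      if (t ++ " " ++ u) ∈ pvTerms then (t ++ " " ++ u) :: goA rest
      else t :: u :: goA rest
    else t :: goA (u :: rest)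

lemma foldA_eq_goA : ∀ (l res : List String),
    (l.foldl pvAStep (res, none)).1 = res ++ goA l := by
  intro l
  induction l using goA.induct with
  | case1 => intro res; simp [goA]
  | case2 t ht => intro res; simp [goA, pvAStep, ht]
  | case3 t ht => intro res; simp [goA, pvAStep, ht]
  | case4 t u rest ht hm ih =>
    intro res
    simp [goA, pvAStep, ht, hm, List.foldl, ih]
  | case5 t u rest ht hm ih =>
    intro res
    simp [goA, pvAStep, ht, hm, List.foldl, ih]
  | case6 t u rest ht ih =>
    intro res
    have := ih (res ++ [t])
    simp only [goA, pvAStep, ht, List.foldl] at this ⊢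
    simpa using this

def pvRun (l : List String) : Nat :=
  (l.reverse.takeWhile (fun t => t ∈ pvTermsStart)).length

lemma takeWhile_length_append_singleton (p : String → Bool) (l : List String) (t : String) :
    ((l ++ [t]).takeWhile p).length =
      (l.takeWhile p).length + (if l.all p ∧ p t then 1 else 0) := by
  induction l with
  | nil => by_cases h : p t = true <;> simp [List.takeWhile, h]
  | cons a l ih =>
    by_cases ha : p a = true
    · simp [List.takeWhile, ha, ih]
      split_ifs with h1 h2 <;> simp_all
    · simp [List.takeWhile, ha]

lemma pvRun_cons (t : String) (l : List String) :
    pvRun (t :: l) = pvRun l +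
      (if l.all (fun s => s ∈ pvTermsStart) ∧ t ∈ pvTermsStart then 1 else 0) := by
  unfold pvRun
  have := takeWhile_length_append_singleton (fun s => decide (s ∈ pvTermsStart)) l.reverse t
  simp only [List.reverse_cons]
  rw [this]
  congr 1
  split_ifs with h1 h2 <;> simp_all

lemma pvRun_parity_cons_cons (t u : String) (rest : List String)
    (ht : t ∈ pvTermsStart) :
    pvRun (t :: u :: rest) % 2 = pvRun rest % 2 := by
  rw [pvRun_cons, pvRun_cons]
  by_cases hu : u ∈ pvTermsStart <;>
    by_cases hr : rest.all (fun s => s ∈ pvTermsStart) = true <;>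
      simp [ht, hu, hr] <;> omega

lemma pvRun_parity_cons (t : String) (l : List String)
    (ht : t ∉ pvTermsStart) : pvRun (t :: l) = pvRun l := by
  rw [pvRun_cons]
  simp [ht]

lemma main_lemma : ∀ (l : List String),
    (pvRun l % 2 = 1 → ∃ t, pvBGo l = goA l ++ [t]) ∧
    (pvRun l % 2 ≠ 1 → pvBGo l = goA l) := by
  intro l
  induction l using goA.induct with
  | case1 =>
    constructor <;> intro h <;> simp [pvRun, pvBGo, goA] at h ⊢
  | case2 t ht =>
    constructor <;> intro h <;>
      simp [pvRun, pvBGo, goA, ht] at h ⊢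
  | case3 t ht =>
    constructor <;> intro h <;>
      simp [pvRun, pvBGo, goA, ht, List.takeWhile] at h ⊢
  | case4 t u rest ht hm ih =>
    have hp := pvRun_parity_cons_cons t u rest ht
    constructor <;> intro h
    · obtain ⟨w, hw⟩ := ih.1 (by omega)
      exact ⟨w, by simp [pvBGo, goA, ht, hm, hw]⟩
    · have := ih.2 (by omega)
      simp [pvBGo, goA, ht, hm, this]
  | case5 t u rest ht hm ih =>
    have hp := pvRun_parity_cons_cons t u rest ht
    constructor <;> intro h
    · obtain ⟨w, hw⟩ := ih.1 (by omega)
      exact ⟨w, by simp [pvBGo, goA, ht, hm, hw]⟩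
    · have := ih.2 (by omega)
      simp [pvBGo, goA, ht, hm, this]
  | case6 t u rest ht ih =>
    have hp := pvRun_parity_cons t (u :: rest) ht
    constructor <;> intro h
    · obtain ⟨w, hw⟩ := ih.1 (by omega)
      exact ⟨w, by simp [pvBGo, goA, ht, hw]⟩
    · have := ih.2 (by omega)
      simp [pvBGo, goA, ht, this]

lemma A_eq_goA (l : List String) : merge_terms_in_tokens l = goA l := by
  simpa using foldA_eq_goA l []

-- ===== VERDICT (by name: the statement is the Claim_ definition above) =====
theorem merge_terms_in_tokens_spec : Claim_unchanged_merge_terms_in_tokens := by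
  intro tokens _ hD
  unfold D_merge_terms_in_tokens at hD
  have := (main_lemma tokens).2 hD
  simp [merge_terms_in_tokens_alt, A_eq_goA, this]

theorem merge_terms_in_tokens_changed : Claim_changed_merge_terms_in_tokens := by
  unfold Claim_changed_merge_terms_in_tokens; decide

theorem merge_terms_in_tokens_tight : Claim_exact_merge_terms_in_tokens := by
  intro tokens _ hD heq
  unfold D_merge_terms_in_tokens at hD
  obtain ⟨w, hw⟩ := (main_lemma tokens).1 hD
  rw [A_eq_goA, merge_terms_in_tokens_alt, hw] at heq
  have : (goA tokens).length = (goA tokens).length + 1 := by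
    conv_lhs => rw [heq]
    simp
  omega
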